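-- pv_equiv track=rewrite | github.com/CIeNET-International/ml-auto-solutions-2 | plugins/google_sheet_listener.py | contains_id
-- ===== SOURCE A (Python) =====
-- from typing import List, Dict, Any, Set
--
-- def contains_id(items: Set[str], target_id: str):
--   id_set = set()
--   for item in items:
--     parts = item.split(":", 1)
--     if len(parts) == 2:
--       key = parts[0].lower()
--       value = parts[1].strip()
--       if key == "id":
--         id_set.add(value)
--   return target_id in id_set
-- ===== SOURCE B (Python) =====
-- def contains_id(items, target_id):
--   # One early-exiting pass: test each item directly, no intermediate set.
--   for item in items:
--     parts = item.split(":", 1)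
--     if len(parts) == 2 and parts[0].lower() == "id" and parts[1].strip() == target_id:
--       return True
--   return False
-- ===== Notes on version B (the rewrite author's own statement) =====
-- stated objective: simpler
-- what changed: B fuses A's build-a-set-then-membership-test into a single early-exiting loop that tests each item directly and returns True on the first match, maintaining no intermediate set.
import Mathlib
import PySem

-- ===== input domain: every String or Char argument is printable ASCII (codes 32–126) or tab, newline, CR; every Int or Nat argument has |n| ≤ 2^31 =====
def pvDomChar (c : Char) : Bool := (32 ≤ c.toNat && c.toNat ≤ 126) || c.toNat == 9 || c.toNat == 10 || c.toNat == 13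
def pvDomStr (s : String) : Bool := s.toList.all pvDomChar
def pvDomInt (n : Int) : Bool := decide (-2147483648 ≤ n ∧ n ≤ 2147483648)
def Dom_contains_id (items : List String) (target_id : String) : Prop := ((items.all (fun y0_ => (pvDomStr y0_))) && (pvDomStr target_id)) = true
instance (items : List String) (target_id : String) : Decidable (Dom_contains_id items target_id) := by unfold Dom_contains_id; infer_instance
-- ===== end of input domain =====

-- B replaces A's build-a-set-then-membership-test by a single early-exiting loop (simpler; same cost).

-- ===== PORT A =====
def contains_id (items : List String) (target_id : String) : Bool :=
  let id_set := items.foldl (fun id_set item =>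
    match PySem.Str.splitMax? item ":" 1 with
    | some parts =>
      if parts.length == 2 then
        let key := PySem.Str.lower (parts.getD 0 "")
        let value := PySem.Str.strip (parts.getD 1 "")
        if key == "id" then PySem.Set.add id_set value else id_set
      else id_set
    | none => id_set) PySem.Set.empty
  PySem.Set.contains id_set target_id

-- ===== PORT B =====
def contains_id_alt (items : List String) (target_id : String) : Bool :=
  match items with
  | [] => false
  | item :: rest =>
    if (match PySem.Str.splitMax? item ":" 1 with
        | some [k, v] => PySem.Str.lower k == "id" && PySem.Str.strip v == target_id
        | _ => false)
    then true
    else contains_id_alt rest target_id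

-- ===== PRECONDITION & SPEC =====
def Spec_contains_id (items : List String) (target_id : String) (out : Bool) : Prop := out = contains_id_alt items target_id
instance (items : List String) (target_id : String) (out : Bool) : Decidable (Spec_contains_id items target_id out) := by unfold Spec_contains_id; infer_instance

-- ===== CLAIM (what is proved, stated in full; the proofs are below) =====
def Claim_equal_contains_id : Prop := ∀ (items : List String) (target_id : String), Dom_contains_id items target_id → Spec_contains_id items target_id (contains_id items target_id)

-- ===== LEMMAS AND PROOFS =====

theorem contains_add (s : PySem.Set String) (x y : String) :
    PySem.Set.contains (PySem.Set.add s x) y = (PySem.Set.contains s y || (y == x)) := by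
  simp only [PySem.Set.contains_eq_listContains]
  simp [PySem.Set.add_eq_ite]
  split_ifs with h
  · simp; intro he; subst he; exact h
  · cases hd : (y == x) <;> simp_all

theorem contains_id_invariant (items : List String) (target_id : String) (s : PySem.Set String) :
    PySem.Set.contains (items.foldl (fun id_set item =>
      match PySem.Str.splitMax? item ":" 1 with
      | some parts =>
        if parts.length == 2 then
          let key := PySem.Str.lower (parts.getD 0 "")
          let value := PySem.Str.strip (parts.getD 1 "")
          if key == "id" then PySem.Set.add id_set value else id_set
        else id_set
      | none => id_set) s) target_id
    = (PySem.Set.contains s target_id || contains_id_alt items target_id) := by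
  induction items generalizing s with
  | nil => simp [contains_id_alt]
  | cons item rest ih =>
    simp only [List.foldl_cons, contains_id_alt]
    rw [ih]
    match h : PySem.Str.splitMax? item ":" 1 with
    | none => simp
    | some [] => simp
    | some [k] => simp
    | some [k, v] =>
      have hlen : ((0 + 1 + 1 : Nat) == 2) = true := by decide
      simp only [List.length_cons, List.length_nil, List.getD, List.getElem?_cons_zero,
        List.getElem?_cons_succ, Option.getD_some, hlen, if_true]
      by_cases hk : PySem.Str.lower k == "id"
      · rw [if_pos hk, contains_add]
        by_cases hv : PySem.Str.strip v == target_id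
        · have hv' : PySem.Str.strip v = target_id := by simpa using hv
          subst hv'; simp [hk]
        · have hb : (target_id == PySem.Str.strip v) = false := by
            simp only [beq_iff_eq] at hv; simp only [beq_eq_false_iff_ne, ne_eq]
            exact fun he => hv (Eq.symm he)
          simp [hk, hv, hb]
      · rw [if_neg hk]; simp [hk]
    | some (k :: v :: w :: ws) =>
      simp

-- ===== VERDICT (by name: the statement is the Claim_ definition above) =====
theorem contains_id_spec : Claim_equal_contains_id := by
  intro items target_id _
  unfold Spec_contains_id contains_id
  rw [contains_id_invariant]
  simp [PySem.Set.empty]
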